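-- pv_equiv track=rewrite | github.com/Saieiei/P1-PR-Reviewer-Recommendation | offloading-&&-distributed_script.py | compute_absolute_similarity_reviewer
-- ===== SOURCE A (Python) =====
-- def compute_absolute_similarity_reviewer(new_tags, new_files, reviewer_pr_data, w1=1, w2=1):
--     total_score = 0
--     for pr_id, data in reviewer_pr_data.items():
--         pr_tags = data["tags"]
--         pr_files = data["files"]
--         matching_tags = sum(1 for nt in new_tags if any(nt in rt for rt in pr_tags))
--         matching_files = sum(1 for nf in new_files if nf in pr_files)
--         total_score += (w1 * matching_tags) + (w2 * matching_files)
--     return total_score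
-- ===== SOURCE B (Python) =====
-- def compute_absolute_similarity_reviewer(new_tags, new_files, reviewer_pr_data, w1=1, w2=1):
--     tag_total = 0
--     file_pr_count = {}
--     for data in reviewer_pr_data.values():
--         pr_tags = data["tags"]
--         for nt in new_tags:
--             if any(nt in rt for rt in pr_tags):
--                 tag_total += 1
--         for f in set(data["files"]):
--             file_pr_count[f] = file_pr_count.get(f, 0) + 1
--     file_total = sum(file_pr_count.get(nf, 0) for nf in new_files)
--     return w1 * tag_total + w2 * file_total
-- ===== Notes on version B (the rewrite author's own statement) =====
-- stated objective: alternative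
-- what changed: Instead of rescanning every PR's file list for each new file, B builds in one pass over the PRs a counter mapping each file (per-PR deduplicated) to the number of PRs containing it, then gets the file contribution by a single table lookup per new file; weights are applied once to the two accumulated totals rather than per PR.
import Mathlib
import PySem

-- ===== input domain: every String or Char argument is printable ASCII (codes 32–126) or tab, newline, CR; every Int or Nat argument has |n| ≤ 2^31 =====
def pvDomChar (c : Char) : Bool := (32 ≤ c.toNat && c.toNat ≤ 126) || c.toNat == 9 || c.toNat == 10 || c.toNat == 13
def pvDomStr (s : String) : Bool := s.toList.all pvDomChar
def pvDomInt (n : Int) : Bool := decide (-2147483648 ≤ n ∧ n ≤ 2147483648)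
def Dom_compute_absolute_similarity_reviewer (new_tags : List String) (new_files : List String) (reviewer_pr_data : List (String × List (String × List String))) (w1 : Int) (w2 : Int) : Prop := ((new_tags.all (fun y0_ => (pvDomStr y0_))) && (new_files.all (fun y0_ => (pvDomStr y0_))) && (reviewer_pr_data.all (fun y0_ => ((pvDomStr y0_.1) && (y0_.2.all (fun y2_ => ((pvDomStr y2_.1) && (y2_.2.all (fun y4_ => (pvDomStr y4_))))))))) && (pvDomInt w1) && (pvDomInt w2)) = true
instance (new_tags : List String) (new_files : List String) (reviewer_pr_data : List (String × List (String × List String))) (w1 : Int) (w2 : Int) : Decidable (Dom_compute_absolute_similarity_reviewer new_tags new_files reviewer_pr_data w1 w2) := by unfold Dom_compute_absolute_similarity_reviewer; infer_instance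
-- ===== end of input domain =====

-- B replaces A's per-PR rescans of the file lists by one prebuilt counter (file → number of PRs
-- whose file set contains it) and a single lookup pass over new_files; weights applied once at the end.

-- ===== PORT A =====
def compute_absolute_similarity_reviewer (new_tags : List String) (new_files : List String) (reviewer_pr_data : List (String × List (String × List String))) (w1 : Int) (w2 : Int) : Int :=
  reviewer_pr_data.foldl (fun total_score pr =>
    let pr_tags := (PySem.Dict.mk pr.2).getD "tags" []
    let pr_files := (PySem.Dict.mk pr.2).getD "files" []
    let matching_tags : Int := (new_tags.countP (fun nt => pr_tags.any (fun rt => PySem.Str.isIn nt rt)) : Int)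
    let matching_files : Int := (new_files.countP (fun nf => pr_files.contains nf) : Int)
    total_score + (w1 * matching_tags + w2 * matching_files)) 0

-- ===== PORT B =====
def compute_absolute_similarity_reviewer_alt (new_tags : List String) (new_files : List String) (reviewer_pr_data : List (String × List (String × List String))) (w1 : Int) (w2 : Int) : Int :=
  let res : Int × PySem.Dict String Int := reviewer_pr_data.foldl (fun acc pr =>
    let data := PySem.Dict.mk pr.2
    let tag_total := acc.1 + (new_tags.countP (fun nt => (data.getD "tags" []).any (fun rt => PySem.Str.isIn nt rt)) : Int)
    let file_pr_count := (PySem.Set.ofList (data.getD "files" [])).foldl (fun d f => d.modify f 0 (· + 1)) acc.2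
    (tag_total, file_pr_count)) (0, PySem.Dict.empty)
  let file_total : Int := (new_files.map (fun nf => res.2.getD nf 0)).sum
  w1 * res.1 + w2 * file_total

-- ===== PRECONDITION & SPEC =====
-- Pre_ excludes exactly the inputs where some PR's data dict lacks the key "tags" or "files":
-- there Python A raises KeyError (and B raises too).
def Pre_compute_absolute_similarity_reviewer (new_tags : List String) (new_files : List String) (reviewer_pr_data : List (String × List (String × List String))) (w1 : Int) (w2 : Int) : Prop :=
  ∀ pr ∈ reviewer_pr_data, "tags" ∈ pr.2.map Prod.fst ∧ "files" ∈ pr.2.map Prod.fst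
instance (new_tags : List String) (new_files : List String) (reviewer_pr_data : List (String × List (String × List String))) (w1 : Int) (w2 : Int) : Decidable (Pre_compute_absolute_similarity_reviewer new_tags new_files reviewer_pr_data w1 w2) := by unfold Pre_compute_absolute_similarity_reviewer; infer_instance

def pvWitness_compute_absolute_similarity_reviewer : List String × List String × (List (String × List (String × List String))) × Int × Int :=
  (["a"], ["f.py"], [("p1", [("tags", ["abc"]), ("files", ["f.py", "g.py"])])], 1, 2)

def Spec_compute_absolute_similarity_reviewer (new_tags : List String) (new_files : List String) (reviewer_pr_data : List (String × List (String × List String))) (w1 : Int) (w2 : Int) (out : Int) : Prop := out = compute_absolute_similarity_reviewer_alt new_tags new_files reviewer_pr_data w1 w2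
instance (new_tags : List String) (new_files : List String) (reviewer_pr_data : List (String × List (String × List String))) (w1 : Int) (w2 : Int) (out : Int) : Decidable (Spec_compute_absolute_similarity_reviewer new_tags new_files reviewer_pr_data w1 w2 out) := by unfold Spec_compute_absolute_similarity_reviewer; infer_instance

-- ===== CLAIM (what is proved, stated in full; the proofs are below) =====
def Claim_equal_compute_absolute_similarity_reviewer : Prop := ∀ (new_tags : List String) (new_files : List String) (reviewer_pr_data : List (String × List (String × List String))) (w1 : Int) (w2 : Int), Dom_compute_absolute_similarity_reviewer new_tags new_files reviewer_pr_data w1 w2 → Pre_compute_absolute_similarity_reviewer new_tags new_files reviewer_pr_data w1 w2 → Spec_compute_absolute_similarity_reviewer new_tags new_files reviewer_pr_data w1 w2 (compute_absolute_similarity_reviewer new_tags new_files reviewer_pr_data w1 w2)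

-- ===== LEMMAS AND PROOFS =====

-- per-PR tag / file counts (abbreviations for the proofs only)
def pvMt (new_tags : List String) (pr : String × List (String × List String)) : Int :=
  (new_tags.countP (fun nt => ((PySem.Dict.mk pr.2).getD "tags" []).any (fun rt => PySem.Str.isIn nt rt)) : Int)
def pvMf (new_files : List String) (pr : String × List (String × List String)) : Int :=
  (new_files.countP (fun nf => ((PySem.Dict.mk pr.2).getD "files" []).contains nf) : Int)

-- A is the sum over PRs of w1*mt + w2*mf
lemma A_eq_sum (new_tags new_files : List String) (rpd : List (String × List (String × List String))) (w1 w2 : Int) :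
    compute_absolute_similarity_reviewer new_tags new_files rpd w1 w2
      = (rpd.map (fun pr => w1 * pvMt new_tags pr + w2 * pvMf new_files pr)).sum := by
  simp only [compute_absolute_similarity_reviewer, pvMt, pvMf]
  rw [PySem.List.foldl_add, zero_add]

-- first component of B's fold: the accumulated tag total
lemma B_fold_fst (new_tags : List String) (rpd : List (String × List (String × List String)))
    (acc : Int × PySem.Dict String Int) :
    (rpd.foldl (fun acc pr =>
        ((acc.1 + (new_tags.countP (fun nt => ((PySem.Dict.mk pr.2).getD "tags" []).any (fun rt => PySem.Str.isIn nt rt)) : Int),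
          (PySem.Set.ofList ((PySem.Dict.mk pr.2).getD "files" [])).foldl (fun d f => d.modify f 0 (· + 1)) acc.2) : Int × PySem.Dict String Int)) acc).1
      = acc.1 + (rpd.map (pvMt new_tags)).sum := by
  induction rpd generalizing acc with
  | nil => simp
  | cons pr rest ih =>
    rw [List.foldl_cons, ih]
    simp only [pvMt, List.map_cons, List.sum_cons]
    ring

-- a per-PR set counts any element 0 or 1 times
lemma count_set_ofList (fs : List String) (nf : String) :
    ((PySem.Set.ofList fs).count nf : Int) = (if fs.contains nf then (1 : Int) else 0) := by
  by_cases h : nf ∈ fs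
  · rw [List.count_eq_one_of_mem (PySem.Set.nodup_ofList fs) ((PySem.Set.mem_ofList fs nf).2 h)]
    simp [h]
  · rw [List.count_eq_zero.2 (fun hm => h ((PySem.Set.mem_ofList fs nf).1 hm))]
    simp [h]

-- second component of B's fold: the counter maps nf to the number of PRs whose file set contains nf
lemma B_fold_snd (new_tags : List String) (rpd : List (String × List (String × List String)))
    (acc : Int × PySem.Dict String Int) (nf : String) :
    ((rpd.foldl (fun acc pr =>
        ((acc.1 + (new_tags.countP (fun nt => ((PySem.Dict.mk pr.2).getD "tags" []).any (fun rt => PySem.Str.isIn nt rt)) : Int),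
          (PySem.Set.ofList ((PySem.Dict.mk pr.2).getD "files" [])).foldl (fun d f => d.modify f 0 (· + 1)) acc.2) : Int × PySem.Dict String Int)) acc).2).getD nf 0
      = acc.2.getD nf 0 + (rpd.map (fun pr => if ((PySem.Dict.mk pr.2).getD "files" []).contains nf then (1 : Int) else 0)).sum := by
  induction rpd generalizing acc with
  | nil => simp
  | cons pr rest ih =>
    rw [List.foldl_cons, ih]
    simp only [List.map_cons, List.sum_cons]
    rw [PySem.Dict.getD_foldl_modify_add_one, count_set_ofList]
    ring

-- swap of the two summations for the file part
lemma swap_sum (new_files : List String) (rpd : List (String × List (String × List String))) :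
    (new_files.map (fun nf => (rpd.map (fun pr => if ((PySem.Dict.mk pr.2).getD "files" []).contains nf then (1 : Int) else 0)).sum)).sum
      = (rpd.map (pvMf new_files)).sum := by
  induction rpd with
  | nil => simp
  | cons pr rest ih =>
    simp only [List.map_cons, List.sum_cons]
    rw [PySem.List.sum_map_add_int, PySem.List.sum_map_ite_one_zero, ih]
    rfl

lemma B_eq_sum (new_tags new_files : List String) (rpd : List (String × List (String × List String))) (w1 w2 : Int) :
    compute_absolute_similarity_reviewer_alt new_tags new_files rpd w1 w2
      = w1 * (rpd.map (pvMt new_tags)).sum + w2 * (rpd.map (pvMf new_files)).sum := by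
  simp only [compute_absolute_similarity_reviewer_alt]
  rw [B_fold_fst]
  simp only [B_fold_snd, PySem.Dict.getD_empty, zero_add]
  rw [swap_sum]

-- ===== VERDICT (by name: the statement is the Claim_ definition above) =====
theorem compute_absolute_similarity_reviewer_spec : Claim_equal_compute_absolute_similarity_reviewer := by
  intro new_tags new_files rpd w1 w2 _ _
  unfold Spec_compute_absolute_similarity_reviewer
  rw [A_eq_sum, B_eq_sum, PySem.List.sum_map_add_int, List.sum_map_mul_left, List.sum_map_mul_left]
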